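-- pv_equiv track=rewrite | github.com/muteshadow/data-science-technical-task | task1/lakes.py | deepest_lake_depth
-- ===== SOURCE A (Python) =====
-- def deepest_lake_depth(heights):
--   n = len(heights)
--   max_depth = 0
--   lakes = []
--
--   # iterate over all possible pairs of boundaries
--   for i in range(n):
--     for j in range(i + 2, n):
--       water_level = min(heights[i], heights[j])
--       inside = heights[i+1:j]
--
--       # skip if there is no space between
--       if not inside: continue
--
--       bottom = min(inside)
--
--       # check if a valid lake is formed
--       if all(h < water_level for h in inside):
--         depth = water_level - bottom
--
--         # new max depth found
--         if depth > max_depth: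
--           max_depth = depth
--           lakes = [(i, j, depth, water_level, bottom)]
--
--         # another lake with the same max depth
--         elif depth == max_depth:
--
--           # avoid nested duplicate
--           if not any(i >= l[0] and j <= l[1] for l in lakes):
--             lakes.append((i, j, depth, water_level, bottom))
--
--   return max_depth, lakes
-- ===== SOURCE B (Python) =====
-- def deepest_lake_depth(heights):
--   n = len(heights)
--   max_depth = 0
--   lakes = []
--
--   # single sweep per left boundary with running interior max/min; early break
--   for i in range(n - 2):
--     hi = heights[i]
--     mx = mn = heights[i + 1]
--     if mx >= hi:
--       # interior already reaches the left wall: no lake can start at i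
--       continue
--     for j in range(i + 2, n):
--       hj = heights[j]
--       water = hi if hi < hj else hj
--       if mx < water:
--         depth = water - mn
--         if depth > max_depth:
--           max_depth = depth
--           lakes = [(i, j, depth, water, mn)]
--         elif depth == max_depth:
--           if not any(i >= l[0] and j <= l[1] for l in lakes):
--             lakes.append((i, j, depth, water, mn))
--       if hj > mx:
--         mx = hj
--         if mx >= hi:
--           break
--       elif hj < mn:
--         mn = hj
--   return max_depth, lakes
-- ===== Notes on version B (the rewrite author's own statement) =====
-- stated objective: faster
-- what changed: Instead of rescanning the interior slice (min + all) for every boundary pair, B does one left-to-right sweep per left boundary, maintaining a running interior max/min, skipping left boundaries the first interior element already reaches, and breaking as soon as the interior max reaches the left wall.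
import Mathlib
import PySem

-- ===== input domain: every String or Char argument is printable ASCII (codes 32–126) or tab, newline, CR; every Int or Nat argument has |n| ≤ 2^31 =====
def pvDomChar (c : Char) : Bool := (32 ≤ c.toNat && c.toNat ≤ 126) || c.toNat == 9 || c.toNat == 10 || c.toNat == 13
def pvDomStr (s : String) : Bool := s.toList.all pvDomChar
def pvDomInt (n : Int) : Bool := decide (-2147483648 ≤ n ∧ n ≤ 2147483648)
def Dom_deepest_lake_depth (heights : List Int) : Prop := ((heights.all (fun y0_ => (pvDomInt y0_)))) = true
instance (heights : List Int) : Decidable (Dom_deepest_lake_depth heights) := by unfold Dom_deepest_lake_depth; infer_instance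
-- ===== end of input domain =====

-- B replaces A's per-pair slice/min/all rescans by one sweep per left boundary with a
-- running interior max/min and an early break once the interior reaches the left wall.

-- ===== PORT A =====
-- body of A's inner 'for j' loop (indices i, j; state = (max_depth, lakes))
def pvStepA (heights : List Int) (i j : Int)
    (st : Int × List (Int × Int × Int × Int × Int)) : Int × List (Int × Int × Int × Int × Int) :=
  let water := min (PySem.List.pyGetD heights i 0) (PySem.List.pyGetD heights j 0)
  let inside := PySem.List.slice heights (some (i + 1)) (some j)
  if inside = [] then st
  else
    let bottom := (PySem.List.min? inside (fun x => x)).getD 0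
    if inside.all (fun h => decide (h < water)) then
      let depth := water - bottom
      if depth > st.1 then (depth, [(i, j, depth, water, bottom)])
      else if depth = st.1 then
        if st.2.any (fun l => decide (i ≥ l.1) && decide (j ≤ l.2.1)) then st
        else (st.1, st.2 ++ [(i, j, depth, water, bottom)])
      else st
    else st

def deepest_lake_depth (heights : List Int) : Int × (List (Int × Int × Int × Int × Int)) :=
  let n : Int := PySem.List.len heights
  (PySem.List.pyRange 0 n 1).foldl
    (fun st i => (PySem.List.pyRange (i + 2) n 1).foldl (fun st j => pvStepA heights i j st) st)
    (0, [])

-- ===== PORT B =====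
-- B's inner 'for j' loop: walks the suffix heights[i+2:] keeping j and the running
-- interior max mx / min mn; returning without a recursive call is Python's 'break'
def pvInnerB (i hi : Int) :
    List Int → Int → Int → Int → Int × List (Int × Int × Int × Int × Int) →
    Int × List (Int × Int × Int × Int × Int)
  | [], _, _, _, st => st
  | hj :: rest, j, mx, mn, st =>
    let water := if hi < hj then hi else hj
    let st' :=
      if mx < water then
        let depth := water - mn
        if depth > st.1 then (depth, [(i, j, depth, water, mn)])
        else if depth = st.1 then
          if st.2.any (fun l => decide (i ≥ l.1) && decide (j ≤ l.2.1)) then st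
          else (st.1, st.2 ++ [(i, j, depth, water, mn)])
        else st
      else st
    if hj > mx then
      if hj ≥ hi then st'                       -- break
      else pvInnerB i hi rest (j + 1) hj mn st'
    else pvInnerB i hi rest (j + 1) mx (if hj < mn then hj else mn) st'

def deepest_lake_depth_alt (heights : List Int) : Int × (List (Int × Int × Int × Int × Int)) :=
  let n : Int := PySem.List.len heights
  (PySem.List.pyRange 0 (n - 2) 1).foldl
    (fun st i =>
      let hi := PySem.List.pyGetD heights i 0
      let m0 := PySem.List.pyGetD heights (i + 1) 0
      if m0 ≥ hi then st                        -- continue: no lake can start at i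
      else pvInnerB i hi (heights.drop (i + 2).toNat) (i + 2) m0 m0 st)
    (0, [])

-- ===== PRECONDITION & SPEC =====
def Spec_deepest_lake_depth (heights : List Int) (out : Int × (List (Int × Int × Int × Int × Int))) : Prop := out = deepest_lake_depth_alt heights
instance (heights : List Int) (out : Int × (List (Int × Int × Int × Int × Int))) : Decidable (Spec_deepest_lake_depth heights out) := by unfold Spec_deepest_lake_depth; infer_instance

-- ===== CLAIM (what is proved, stated in full; the proofs are below) =====
def Claim_equal_deepest_lake_depth : Prop := ∀ (heights : List Int), Dom_deepest_lake_depth heights → Spec_deepest_lake_depth heights (deepest_lake_depth heights)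

-- ===== LEMMAS AND PROOFS =====

-- the interior heights[i+1:j] as drop/take, for Nat indices
def pvIns (H : List Int) (ni nj : Nat) : List Int := (H.drop (ni + 1)).take (nj - (ni + 1))

lemma pvSliceEq (H : List Int) (ni nj : Nat) :
    PySem.List.slice H (some ((ni : Int) + 1)) (some (nj : Int)) = pvIns H ni nj := by
  have h1 : ((ni : Int) + 1) = (((ni + 1 : Nat) : Int)) := by push_cast; ring
  rw [h1, PySem.List.slice_natCast, pvIns]

lemma pvIns_succ (H : List Int) (ni nj : Nat) (h1 : ni + 1 ≤ nj) (h2 : nj < H.length) :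
    pvIns H ni (nj + 1) = pvIns H ni nj ++ [H.getD nj 0] := by
  unfold pvIns
  have e : nj + 1 - (ni + 1) = (nj - (ni + 1)) + 1 := by omega
  rw [e, List.take_add_one]
  congr 1
  rw [List.getElem?_drop]
  have e2 : ni + 1 + (nj - (ni + 1)) = nj := by omega
  rw [e2, List.getElem?_eq_getElem h2, List.getD_eq_getElem H 0 h2]
  rfl

lemma pvStepA_noop (H : List Int) (ni nj : Nat) (st : Int × List (Int × Int × Int × Int × Int))
    (h : ∃ x ∈ pvIns H ni nj, H.getD ni 0 ≤ x) :
    pvStepA H (ni : Int) (nj : Int) st = st := by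
  obtain ⟨x, hx, hle⟩ := h
  have hne : pvIns H ni nj ≠ [] := by intro e; rw [e] at hx; exact (List.not_mem_nil).elim hx
  have hall : (pvIns H ni nj).all
      (fun h => decide (h < min (PySem.List.pyGetD H (ni : Int) 0) (PySem.List.pyGetD H (nj : Int) 0))) = false := by
    refine List.all_eq_false.mpr ⟨x, hx, ?_⟩
    simp only [PySem.List.pyGetD_natCast, decide_eq_true_eq, not_lt]
    exact le_trans (min_le_left _ _) hle
  simp only [pvStepA, pvSliceEq, if_neg hne, hall]
  simp

lemma pvTail_noop (H : List Int) (ni : Nat) : ∀ (fuel nj : Nat) (st : Int × List (Int × Int × Int × Int × Int)),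
    H.length ≤ nj + fuel →
    (∃ x ∈ pvIns H ni nj, H.getD ni 0 ≤ x) →
    (PySem.List.pyRange (nj : Int) (H.length : Int) 1).foldl (fun st j => pvStepA H (ni : Int) j st) st = st := by
  intro fuel
  induction fuel with
  | zero =>
    intro nj st hlen _
    rw [PySem.List.pyRange_one_eq_nil (by exact_mod_cast hlen)]
    rfl
  | succ f ih =>
    intro nj st hlen hw
    by_cases hnj : H.length ≤ nj
    · rw [PySem.List.pyRange_one_eq_nil (by exact_mod_cast hnj)]
      rfl
    · rw [not_le] at hnj
      rw [PySem.List.pyRange_one_cons (by exact_mod_cast hnj), List.foldl_cons,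
        pvStepA_noop H ni nj st hw]
      have e : ((nj : Int) + 1) = (((nj + 1 : Nat)) : Int) := by push_cast; ring
      rw [e]
      refine ih (nj + 1) st (by omega) ?_
      obtain ⟨x, hx, hle⟩ := hw
      refine ⟨x, ?_, hle⟩
      exact (List.take_prefix_take_left (h := by omega) (l := H.drop (ni+1))).subset hx

lemma pvStepA_char (H : List Int) (ni nj : Nat) (mx mn : Int)
    (_hij : ni + 2 ≤ nj) (_hjn : nj < H.length)
    (hmx1 : mx ∈ pvIns H ni nj) (hmx2 : ∀ x ∈ pvIns H ni nj, x ≤ mx)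
    (hmn1 : mn ∈ pvIns H ni nj) (hmn2 : ∀ x ∈ pvIns H ni nj, mn ≤ x)
    (st : Int × List (Int × Int × Int × Int × Int)) :
    pvStepA H (ni : Int) (nj : Int) st =
      (let water := min (H.getD ni 0) (H.getD nj 0)
       if mx < water then
         let depth := water - mn
         if depth > st.1 then (depth, [((ni : Int), (nj : Int), depth, water, mn)])
         else if depth = st.1 then
           if st.2.any (fun l => decide ((ni : Int) ≥ l.1) && decide ((nj : Int) ≤ l.2.1)) then st
           else (st.1, st.2 ++ [((ni : Int), (nj : Int), depth, water, mn)])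
         else st
       else st) := by
  have hne : pvIns H ni nj ≠ [] := by
    intro e; rw [e] at hmx1; exact (List.not_mem_nil).elim hmx1
  obtain ⟨m, hm⟩ : ∃ m, PySem.List.min? (pvIns H ni nj) (fun x => x) = some m := by
    cases hc : PySem.List.min? (pvIns H ni nj) (fun x => x) with
    | none => exact absurd ((PySem.List.min?_eq_none_iff _ _).mp hc) hne
    | some m => exact ⟨m, rfl⟩
  have hmmem := PySem.List.min?_mem hm
  have hmin := PySem.List.min?_isMin hm
  have hbot : m = mn := le_antisymm (hmin mn hmn1) (hmn2 m hmmem)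
  have hall : (pvIns H ni nj).all
      (fun h => decide (h < min (H.getD ni 0) (H.getD nj 0)))
      = decide (mx < min (H.getD ni 0) (H.getD nj 0)) := by
    by_cases hc : mx < min (H.getD ni 0) (H.getD nj 0)
    · simp only [hc, decide_true, List.all_eq_true, decide_eq_true_eq]
      exact fun x hx => lt_of_le_of_lt (hmx2 x hx) hc
    · simp only [hc, decide_false]
      exact List.all_eq_false.mpr ⟨mx, hmx1, by simpa using hc⟩
  simp only [pvStepA, pvSliceEq, if_neg hne, hm, hall, PySem.List.pyGetD_natCast,
    Option.getD_some, hbot, decide_eq_true_eq]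

lemma pvInnerB_eq (H : List Int) (ni : Nat) :
    ∀ (rest : List Int) (nj : Nat) (mx mn : Int) (st : Int × List (Int × Int × Int × Int × Int)),
    rest = H.drop nj → ni + 2 ≤ nj →
    mx ∈ pvIns H ni nj → (∀ x ∈ pvIns H ni nj, x ≤ mx) →
    mn ∈ pvIns H ni nj → (∀ x ∈ pvIns H ni nj, mn ≤ x) →
    mx < H.getD ni 0 →
    pvInnerB (ni : Int) (H.getD ni 0) rest (nj : Int) mx mn st =
      (PySem.List.pyRange (nj : Int) (H.length : Int) 1).foldl (fun st j => pvStepA H (ni : Int) j st) st := by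
  intro rest
  induction rest with
  | nil =>
    intro nj mx mn st hrest _ hmx1 _ _ _ _
    have hlen : H.length ≤ nj := by
      have h2 := hrest.symm
      rwa [List.drop_eq_nil_iff] at h2
    rw [PySem.List.pyRange_one_eq_nil (by exact_mod_cast hlen)]
    rfl
  | cons hj rest' ih =>
    intro nj mx mn st hrest hge hmx1 hmx2 hmn1 hmn2 hlt
    have hjn : nj < H.length := by
      by_contra hno
      rw [not_lt] at hno
      rw [List.drop_eq_nil_of_le hno] at hrest
      exact List.cons_ne_nil _ _ hrest
    have hhj : hj = H.getD nj 0 := by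
      have h1 : (H.drop nj).head? = some hj := by rw [← hrest]; rfl
      rw [List.head?_drop, List.getElem?_eq_getElem hjn] at h1
      rw [List.getD_eq_getElem H 0 hjn]
      exact (Option.some_inj.mp h1).symm
    have hrest' : rest' = H.drop (nj + 1) := by
      have h2 : (H.drop nj).tail = rest' := by rw [← hrest]; rfl
      rw [List.tail_drop] at h2
      exact h2.symm
    have hins := pvIns_succ H ni nj (by omega) hjn
    rw [← hhj] at hins
    have hcast : ((nj : Int) + 1) = (((nj + 1 : Nat)) : Int) := by push_cast; ring
    have hw : (if H.getD ni 0 < hj then H.getD ni 0 else hj) = min (H.getD ni 0) (H.getD nj 0) := by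
      rw [← hhj, min_def]
      split_ifs <;> omega
    rw [PySem.List.pyRange_one_cons (by exact_mod_cast hjn), List.foldl_cons,
      pvStepA_char H ni nj mx mn (by omega) hjn hmx1 hmx2 hmn1 hmn2 st]
    simp only [pvInnerB, hw]
    by_cases hgt : hj > mx
    · by_cases hbr : hj ≥ H.getD ni 0
      · rw [if_pos hgt, if_pos hbr, hcast]
        exact (pvTail_noop H ni H.length (nj + 1) _ (by omega)
          ⟨hj, by rw [hins]; exact List.mem_append_right _ (List.mem_singleton.mpr rfl), hbr⟩).symm
      · rw [if_pos hgt, if_neg hbr, hcast]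
        rw [not_le] at hbr
        refine ih (nj + 1) hj mn _ hrest' (by omega) ?_ ?_ ?_ ?_ hbr
        · rw [hins]; exact List.mem_append_right _ (List.mem_singleton.mpr rfl)
        · intro x hx
          rw [hins] at hx
          rcases List.mem_append.mp hx with h | h
          · exact le_of_lt (lt_of_le_of_lt (hmx2 x h) hgt)
          · rw [List.mem_singleton.mp h]
        · rw [hins]; exact List.mem_append_left _ hmn1
        · intro x hx
          rw [hins] at hx
          rcases List.mem_append.mp hx with h | h
          · exact hmn2 x h
          · rw [List.mem_singleton.mp h]
            exact le_of_lt (lt_of_le_of_lt (hmn2 mx hmx1) hgt)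
    · rw [if_neg hgt, hcast]
      rw [not_lt] at hgt
      refine ih (nj + 1) mx _ _ hrest' (by omega) ?_ ?_ ?_ ?_ hlt
      · rw [hins]; exact List.mem_append_left _ hmx1
      · intro x hx
        rw [hins] at hx
        rcases List.mem_append.mp hx with h | h
        · exact hmx2 x h
        · rw [List.mem_singleton.mp h]; exact hgt
      · rw [hins]
        by_cases hmnc : hj < mn
        · rw [if_pos hmnc]
          exact List.mem_append_right _ (List.mem_singleton.mpr rfl)
        · rw [if_neg hmnc]
          exact List.mem_append_left _ hmn1
      · intro x hx
        rw [hins] at hx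
        rcases List.mem_append.mp hx with h | h
        · by_cases hmnc : hj < mn
          · rw [if_pos hmnc]
            exact le_of_lt (lt_of_lt_of_le hmnc (hmn2 x h))
          · rw [if_neg hmnc]
            exact hmn2 x h
        · rw [List.mem_singleton.mp h]
          by_cases hmnc : hj < mn
          · rw [if_pos hmnc]
          · rw [if_neg hmnc]
            rw [not_lt] at hmnc
            exact hmnc

-- ===== VERDICT (by name: the statement is the Claim_ definition above) =====
theorem deepest_lake_depth_spec : Claim_equal_deepest_lake_depth := by
  intro H _
  unfold Spec_deepest_lake_depth
  simp only [deepest_lake_depth, deepest_lake_depth_alt, PySem.List.len_eq]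
  have hnoop : ∀ (l : List Int), (∀ i ∈ l, (H.length : Int) ≤ i + 2) →
      ∀ (st : Int × List (Int × Int × Int × Int × Int)),
      List.foldl (fun st i => List.foldl (fun st j => pvStepA H i j st) st
        (PySem.List.pyRange (i + 2) (H.length : Int) 1)) st l = st := by
    intro l
    induction l with
    | nil => intro _ _; rfl
    | cons a t ih =>
      intro hsub st
      rw [List.foldl_cons, PySem.List.pyRange_one_eq_nil (hsub a (List.mem_cons_self))]
      exact ih (fun i hi => hsub i (List.mem_cons_of_mem _ hi)) st
  by_cases hn : H.length < 2
  · rw [PySem.List.pyRange_one_eq_nil (a := 0) (b := (H.length : Int) - 2) (by omega)]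
    rw [hnoop (PySem.List.pyRange 0 (H.length : Int) 1)
      (fun i hi => by rcases (PySem.List.mem_pyRange_one).mp hi with ⟨h0, h1⟩; omega) (0, [])]
    rfl
  · rw [not_lt] at hn
    rw [PySem.List.pyRange_one_append 0 ((H.length : Int) - 2) (H.length : Int) (by omega) (by omega),
      List.foldl_append]
    rw [hnoop (PySem.List.pyRange ((H.length : Int) - 2) (H.length : Int) 1)
      (fun i hi => by rcases (PySem.List.mem_pyRange_one).mp hi with ⟨h0, h1⟩; omega) _]
    refine PySem.List.foldl_congr_mem _ _ _ _ ?_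
    intro st i hi
    rcases (PySem.List.mem_pyRange_one).mp hi with ⟨h0, h1⟩
    obtain ⟨ni, rfl⟩ : ∃ ni : Nat, i = (ni : Int) := ⟨i.toNat, (Int.toNat_of_nonneg h0).symm⟩
    have hlen : ni + 2 < H.length := by omega
    have hc1 : ((ni : Int) + 1) = (((ni + 1 : Nat)) : Int) := by push_cast; ring
    have hc2 : ((ni : Int) + 2) = (((ni + 2 : Nat)) : Int) := by push_cast; ring
    have hbase : pvIns H ni (ni + 2) = [H.getD (ni + 1) 0] := by
      have h0' : pvIns H ni (ni + 1) = [] := by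
        unfold pvIns
        simp
      rw [pvIns_succ H ni (ni + 1) (le_refl _) (by omega), h0']
      rfl
    simp only [hc1, hc2, PySem.List.pyGetD_natCast]
    by_cases hge : H.getD (ni + 1) 0 ≥ H.getD ni 0
    · rw [if_pos hge]
      exact pvTail_noop H ni H.length (ni + 2) st (by omega)
        ⟨H.getD (ni + 1) 0, by rw [hbase]; exact List.mem_singleton.mpr rfl, hge⟩
    · rw [if_neg hge]
      rw [not_le] at hge
      have htn : (((ni + 2 : Nat) : Int)).toNat = ni + 2 := by omega
      rw [htn]
      exact (pvInnerB_eq H ni (H.drop (ni + 2)) (ni + 2) _ _ st rfl (le_refl _)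
        (by rw [hbase]; exact List.mem_singleton.mpr rfl)
        (by rw [hbase]; intro x hx; rw [List.mem_singleton.mp hx])
        (by rw [hbase]; exact List.mem_singleton.mpr rfl)
        (by rw [hbase]; intro x hx; rw [List.mem_singleton.mp hx])
        hge).symm
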